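-- pv_equiv track=rewrite | github.com/smarTHh2019/impro_with_algo | sonic_pi_communication.py | translate_sonic_pi_ring
-- ===== SOURCE A (Python) =====
-- from typing import Tuple
--
-- def translate_sonic_pi_ring(ring_str:str) -> Tuple:
--
--     # example = "[(ring <SonicPi::Chord :C :7 [60, 64, 67, 70]), (ring <SonicPi::Chord :C :7 [60, 64, 67, 70]), (ring <SonicPi::Chord :C :7 [60, 64, 67, 70]), (ring <SonicPi::Chord :C :7 [60, 64, 67, 70])]"
--
--     tmp_1 = ring_str.replace('ring <','').replace('(','').replace(')','')
--     tmp_2 = tmp_1.split('SonicPi::Chord ')[1:]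
--     all_chord_names, all_chord_tones = '', []
--     for ch_str in tmp_2:
--         name_part, number_part = ch_str.split('[')
--         all_chord_names += ',' + name_part.replace(':','').replace(' ','')
--         chord_tones = number_part.replace(']','').replace(' ','')
--         chord_tones = chord_tones.split(',')
--         all_chord_tones.append([int(ii)%12 for ii in chord_tones if ii != ''])
--
--     return all_chord_names[1:], all_chord_tones
-- ===== SOURCE B (Python) =====
-- def translate_sonic_pi_ring(ring_str: str):
--     # single character-level scan per chord chunk instead of A's replace/split pipeline
--     cleaned = ''.join(c for c in ring_str.replace('ring <', '') if c not in '()')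
--     names = []
--     all_tones = []
--     for ch in cleaned.split('SonicPi::Chord ')[1:]:
--         seen_bracket = False
--         name_chars = []
--         tones = []
--         tok = ''
--         for c in ch:
--             if not seen_bracket:
--                 if c == '[':
--                     seen_bracket = True
--                 elif c not in ': ':
--                     name_chars.append(c)
--             else:
--                 if c == ',':
--                     if tok:
--                         tones.append(int(tok) % 12)
--                     tok = ''
--                 elif c not in ' ]':
--                     tok += c
--         if tok:
--             tones.append(int(tok) % 12)
--         names.append(''.join(name_chars))
--         all_tones.append(tones)
--     return ','.join(names), all_tones
-- ===== Notes on version B (the rewrite author's own statement) =====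
-- stated objective: alternative
-- what changed: Per chord chunk, A's replace/replace/split pipelines (split on '[', strip ':'/' ' from the name, strip ']'/' ' then split the tones on ',') are replaced by one character-level state-machine scan that builds the name, tone tokens and tone list in a single pass, and A's comma-prefixed string accumulation plus [1:] slice is replaced by collecting names and joining with ','.
import Mathlib
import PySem

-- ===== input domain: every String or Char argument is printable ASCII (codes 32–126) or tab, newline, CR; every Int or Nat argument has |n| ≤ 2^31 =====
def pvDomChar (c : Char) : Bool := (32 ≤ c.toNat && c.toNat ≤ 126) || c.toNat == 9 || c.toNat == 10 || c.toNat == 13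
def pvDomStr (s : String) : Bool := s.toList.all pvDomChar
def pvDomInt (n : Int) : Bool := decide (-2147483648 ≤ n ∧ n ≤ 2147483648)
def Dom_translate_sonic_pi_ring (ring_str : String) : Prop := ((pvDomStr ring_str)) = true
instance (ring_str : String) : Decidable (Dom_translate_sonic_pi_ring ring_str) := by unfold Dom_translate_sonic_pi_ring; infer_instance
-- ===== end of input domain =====

-- B replaces A's replace/split pipeline per chord by a single character-level scan per chunk
-- and a join over collected names (objective: alternative decomposition, same cost).

-- ===== PORT A =====
-- loop body of A's for-loop; Python unpacks ch_str.split('[') into exactly two names and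
-- raises ValueError otherwise — those inputs are excluded by Pre_ below (here: getD).
def pvStepA (st : List Char × List (List Int)) (ch_str : List Char) : List Char × List (List Int) :=
  let parts := PySem.Chars.splitOn ch_str ['[']
  let name_part := parts.getD 0 []
  let number_part := parts.getD 1 []
  let all_chord_names := st.1 ++ ',' :: PySem.Chars.replace (PySem.Chars.replace name_part [':'] []) [' '] []
  let chord_tones := PySem.Chars.splitOn (PySem.Chars.replace (PySem.Chars.replace number_part [']'] []) [' '] []) [',']
  (all_chord_names, st.2 ++ [(chord_tones.filter (fun ii => decide (ii ≠ []))).map (fun ii => PySem.Int.mod ((PySem.Int.ofChars? ii).getD 0) 12)])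

def translate_sonic_pi_ring (ring_str : String) : String × List (List Int) :=
  let tmp_1 := PySem.Chars.replace (PySem.Chars.replace (PySem.Chars.replace ring_str.toList ("ring <".toList) []) ['('] []) [')'] []
  let tmp_2 := PySem.List.slice (PySem.Chars.splitOn tmp_1 ("SonicPi::Chord ".toList)) (some 1) none
  let r := tmp_2.foldl pvStepA ([], [])
  (String.ofList (PySem.List.slice r.1 (some 1) none), r.2)

-- ===== PORT B =====
-- one step of B's character scanner: state (seen_bracket, name_chars, tones, tok)
def pvScanStep (q : Bool × List Char × List Int × List Char) (c : Char) : Bool × List Char × List Int × List Char :=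
  match q with
  | (seen, name, tones, tok) =>
    if seen = false then
      if c = '[' then (true, name, tones, tok)
      else if c = ':' ∨ c = ' ' then (false, name, tones, tok)
      else (false, name ++ [c], tones, tok)
    else
      if c = ',' then
        (true, name, if tok ≠ [] then tones ++ [PySem.Int.mod ((PySem.Int.ofChars? tok).getD 0) 12] else tones, [])
      else if c = ' ' ∨ c = ']' then (true, name, tones, tok)
      else (true, name, tones, tok ++ [c])

-- B's per-chunk loop plus the final flush of tok
def pvScanChunk (ch : List Char) : List Char × List Int :=
  let q := ch.foldl pvScanStep (false, [], [], [])
  (q.2.1, if q.2.2.2 ≠ [] then q.2.2.1 ++ [PySem.Int.mod ((PySem.Int.ofChars? q.2.2.2).getD 0) 12] else q.2.2.1)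

def pvStepB (st : List (List Char) × List (List Int)) (ch : List Char) : List (List Char) × List (List Int) :=
  let p := pvScanChunk ch
  (st.1 ++ [p.1], st.2 ++ [p.2])

def translate_sonic_pi_ring_alt (ring_str : String) : String × List (List Int) :=
  let cleaned := (PySem.Chars.replace ring_str.toList ("ring <".toList) []).filter (fun c => !(['(', ')'].contains c))
  let chunks := PySem.List.slice (PySem.Chars.splitOn cleaned ("SonicPi::Chord ".toList)) (some 1) none
  let r := chunks.foldl pvStepB ([], [])
  (String.ofList (PySem.Chars.join [','] r.1), r.2)

-- ===== PRECONDITION & SPEC =====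
-- Pre_ excludes exactly the inputs on which Python A raises ValueError: a chord chunk whose
-- '[' count is not exactly 1 (tuple-unpacking of ch_str.split('[') fails), or a nonempty tone
-- token that int() rejects.
def Pre_translate_sonic_pi_ring (ring_str : String) : Prop :=
  ∀ ch ∈ (PySem.Chars.splitOn (PySem.Chars.replace (PySem.Chars.replace (PySem.Chars.replace ring_str.toList ("ring <".toList) []) ['('] []) [')'] []) ("SonicPi::Chord ".toList)).drop 1,
    ch.count '[' = 1 ∧
    ∀ t ∈ PySem.Chars.splitOn (PySem.Chars.replace (PySem.Chars.replace ((PySem.Chars.splitOn ch ['[']).getD 1 []) [']'] []) [' '] []) [','],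
      t = [] ∨ (PySem.Int.ofChars? t).isSome = true
instance (ring_str : String) : Decidable (Pre_translate_sonic_pi_ring ring_str) := by unfold Pre_translate_sonic_pi_ring; infer_instance

def pvWitness_translate_sonic_pi_ring : String := "[(ring <SonicPi::Chord :C :7 [60, 64, 67, 70]), (ring <SonicPi::Chord :D :m [62, 65, 69])]"

def Spec_translate_sonic_pi_ring (ring_str : String) (out : String × List (List Int)) : Prop := out = translate_sonic_pi_ring_alt ring_str
instance (ring_str : String) (out : String × List (List Int)) : Decidable (Spec_translate_sonic_pi_ring ring_str out) := by unfold Spec_translate_sonic_pi_ring; infer_instance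

-- ===== CLAIM (what is proved, stated in full; the proofs are below) =====
def Claim_equal_translate_sonic_pi_ring : Prop := ∀ (ring_str : String), Dom_translate_sonic_pi_ring ring_str → Pre_translate_sonic_pi_ring ring_str → Spec_translate_sonic_pi_ring ring_str (translate_sonic_pi_ring ring_str)

-- ===== LEMMAS AND PROOFS =====

def pvSplit1 (a : Char) : List Char → List (List Char)
  | [] => [[]]
  | c :: t =>
    match pvSplit1 a t with
    | [] => [[]]
    | h :: r => if c = a then [] :: h :: r else (c :: h) :: r

theorem pvReplace_go (a : Char) : ∀ (l : List Char) (fuel : Nat) (acc : List Char), l.length ≤ fuel →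
    PySem.Chars.replace.go [a] [] fuel l acc = acc.reverse ++ l.filter (fun c => decide (c ≠ a)) := by
  intro l
  induction l with
  | nil =>
    intro fuel acc _
    cases fuel <;> rw [PySem.Chars.replace.go] <;> simp
  | cons c t ih =>
    intro fuel acc hle
    cases fuel with
    | zero => simp at hle
    | succ n =>
      rw [PySem.Chars.replace.go]
      by_cases hca : a = c
      · subst hca
        simp only [List.isPrefixOf_cons₂, List.isPrefixOf_nil_left, beq_self_eq_true, Bool.and_self, if_true]
        have hdrop : List.drop [a].length (a :: t) = t := by simp
        rw [hdrop, ih _ _ (by simpa using Nat.le_of_succ_le_succ hle)]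
        simp
      · have hpf : [a].isPrefixOf (c :: t) = false := by
          simp [List.isPrefixOf_cons₂, hca]
        rw [hpf]
        simp only [Bool.false_eq_true, if_false]
        rw [ih _ _ (Nat.le_of_succ_le_succ hle)]
        simp [Ne.symm hca]

theorem pvReplace_single (a : Char) (cs : List Char) :
    PySem.Chars.replace cs [a] [] = cs.filter (fun c => decide (c ≠ a)) := by
  rw [PySem.Chars.replace]
  simp only [List.isEmpty_cons, Bool.false_eq_true, if_false]
  rw [pvReplace_go a cs cs.length [] le_rfl]
  simp

theorem pvSplit1_ne_nil (a : Char) (l : List Char) : pvSplit1 a l ≠ [] := by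
  cases l with
  | nil => simp [pvSplit1]
  | cons c t =>
    simp only [pvSplit1]
    rcases h : pvSplit1 a t with _ | ⟨hd, r⟩
    · simp
    · dsimp only
      split <;> simp

theorem pvSplit1_cons_self (a : Char) (t : List Char) : pvSplit1 a (a :: t) = [] :: pvSplit1 a t := by
  rw [pvSplit1]
  rcases h : pvSplit1 a t with _ | ⟨hd, r⟩
  · exact absurd h (pvSplit1_ne_nil a t)
  · simp

theorem pvSplit1_cons_ne (a c : Char) (t : List Char) (hc : c ≠ a) :
    pvSplit1 a (c :: t) = (pvSplit1 a t).modifyHead (c :: ·) := by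
  rw [pvSplit1]
  rcases h : pvSplit1 a t with _ | ⟨hd, r⟩
  · exact absurd h (pvSplit1_ne_nil a t)
  · simp [hc]

theorem pvSplitOn_go (a : Char) : ∀ (l : List Char) (fuel : Nat) (cur : List Char) (acc : List (List Char)), l.length ≤ fuel →
    PySem.Chars.splitOn.go [a] fuel l cur acc = acc.reverse ++ (pvSplit1 a l).modifyHead (cur.reverse ++ ·) := by
  intro l
  induction l with
  | nil =>
    intro fuel cur acc _
    cases fuel <;> rw [PySem.Chars.splitOn.go] <;> simp [pvSplit1]
  | cons c t ih =>
    intro fuel cur acc hle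
    cases fuel with
    | zero => simp at hle
    | succ n =>
      rw [PySem.Chars.splitOn.go]
      by_cases hca : a = c
      · subst hca
        simp only [List.isPrefixOf_cons₂, List.isPrefixOf_nil_left, beq_self_eq_true, Bool.and_self, if_true]
        have hdrop : List.drop [a].length (a :: t) = t := by simp
        rw [hdrop, ih _ _ _ (by simpa using Nat.le_of_succ_le_succ hle)]
        rw [pvSplit1_cons_self]
        rcases pvSplit1 a t with _ | ⟨hd, r⟩ <;> simp
      · have hpf : [a].isPrefixOf (c :: t) = false := by
          simp [List.isPrefixOf_cons₂, hca]
        rw [hpf]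
        simp only [Bool.false_eq_true, if_false]
        rw [ih _ _ _ (Nat.le_of_succ_le_succ hle)]
        rw [pvSplit1_cons_ne a c t (Ne.symm hca)]
        rcases h : pvSplit1 a t with _ | ⟨hd, r⟩
        · exact absurd h (pvSplit1_ne_nil a t)
        · simp

theorem pvSplitOn_single (a : Char) (cs : List Char) : PySem.Chars.splitOn cs [a] = pvSplit1 a cs := by
  rw [PySem.Chars.splitOn, pvSplitOn_go a cs (cs.length+1) [] [] (by omega)]
  rcases h : pvSplit1 a cs with _ | ⟨hd, r⟩
  · exact absurd h (pvSplit1_ne_nil a cs)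
  · simp

theorem pvSplit1_of_not_mem (a : Char) (l : List Char) (h : a ∉ l) : pvSplit1 a l = [l] := by
  induction l with
  | nil => simp [pvSplit1]
  | cons c t ih =>
    simp only [List.mem_cons, not_or] at h
    rw [pvSplit1_cons_ne a c t (Ne.symm h.1), ih h.2]
    simp

theorem pvSplit1_pair (a : Char) (xs ys : List Char) (h : a ∉ xs) :
    pvSplit1 a (xs ++ a :: ys) = xs :: pvSplit1 a ys := by
  induction xs with
  | nil =>
    rw [List.nil_append, pvSplit1_cons_self]
  | cons c t ih =>
    simp only [List.mem_cons, not_or] at h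
    rw [List.cons_append, pvSplit1_cons_ne a c _ (Ne.symm h.1), ih h.2]
    simp

theorem pvCount_one (a : Char) : ∀ (l : List Char), l.count a = 1 →
    ∃ xs ys, l = xs ++ a :: ys ∧ a ∉ xs ∧ a ∉ ys := by
  intro l
  induction l with
  | nil => simp
  | cons c t ih =>
    intro h
    by_cases hca : c = a
    · subst hca
      have ht : t.count c = 0 := by simp [List.count_cons] at h; omega
      exact ⟨[], t, by simp, by simp, by simpa [List.count_eq_zero] using ht⟩
    · have : t.count a = 1 := by simpa [List.count_cons, hca] using h
      obtain ⟨xs, ys, rfl, hx, hy⟩ := ih this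
      exact ⟨c :: xs, ys, by simp, by simp [List.mem_cons, not_or, Ne.symm hca, hx], hy⟩

def pvF (t : List Char) : Int := PySem.Int.mod ((PySem.Int.ofChars? t).getD 0) 12

def pvNameP (c : Char) : Bool := decide (c ≠ ' ') && decide (c ≠ ':')

def pvToneP (c : Char) : Bool := decide (c ≠ ' ') && decide (c ≠ ']')

def pvFlush (q : Bool × List Char × List Int × List Char) : List Char × List Int :=
  (q.2.1, if q.2.2.2 ≠ [] then q.2.2.1 ++ [PySem.Int.mod ((PySem.Int.ofChars? q.2.2.2).getD 0) 12] else q.2.2.1)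

theorem pvNameScan (np : List Char) : ∀ (name : List Char) (tones : List Int) (tok : List Char), '[' ∉ np →
    np.foldl pvScanStep (false, name, tones, tok) = (false, name ++ np.filter pvNameP, tones, tok) := by
  induction np with
  | nil => intro name tones tok _; simp
  | cons c t ih =>
    intro name tones tok h
    simp only [List.mem_cons, not_or] at h
    rw [List.foldl_cons]
    by_cases hc : c = ':' ∨ c = ' '
    · have : pvScanStep (false, name, tones, tok) c = (false, name, tones, tok) := by
        simp [pvScanStep, Ne.symm h.1, hc]
      rw [this, ih _ _ _ h.2]
      rcases hc with hc | hc <;> simp [hc, pvNameP, List.filter_cons]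
    · push_neg at hc
      have : pvScanStep (false, name, tones, tok) c = (false, name ++ [c], tones, tok) := by
        simp [pvScanStep, Ne.symm h.1, hc.1, hc.2]
      rw [this, ih _ _ _ h.2]
      simp [pvNameP, List.filter_cons, hc.1, hc.2]

theorem pvToneScan : ∀ (cs : List Char) (name : List Char) (tones : List Int) (tok : List Char),
    pvFlush (cs.foldl pvScanStep (true, name, tones, tok)) =
      (name, tones ++ (((pvSplit1 ',' (cs.filter pvToneP)).modifyHead (tok ++ ·)).filter (fun t => decide (t ≠ []))).map pvF) := by
  intro cs
  induction cs with
  | nil =>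
    intro name tones tok
    by_cases h : tok = [] <;> simp [pvFlush, pvSplit1, pvF, h]
  | cons c t ih =>
    intro name tones tok
    rw [List.foldl_cons]
    by_cases hc : c = ','
    · subst hc
      have hstep : pvScanStep (true, name, tones, tok) ',' =
          (true, name, if tok ≠ [] then tones ++ [PySem.Int.mod ((PySem.Int.ofChars? tok).getD 0) 12] else tones, []) := by
        simp [pvScanStep]
      rw [hstep, ih]
      have hp : pvToneP ',' = true := by decide
      rw [List.filter_cons_of_pos hp, pvSplit1_cons_self]
      rcases h0 : pvSplit1 ',' (t.filter pvToneP) with _ | ⟨hd, r⟩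
      · exact absurd h0 (pvSplit1_ne_nil _ _)
      · by_cases h : tok = [] <;> simp [h, pvF, List.filter_cons]
    · by_cases hsp : c = ' ' ∨ c = ']'
      · have hstep : pvScanStep (true, name, tones, tok) c = (true, name, tones, tok) := by
          simp [pvScanStep, hc, hsp]
        have hp : pvToneP c = false := by
          rcases hsp with h | h <;> simp [pvToneP, h]
        rw [hstep, ih, List.filter_cons_of_neg (by simp [hp])]
      · push_neg at hsp
        have hstep : pvScanStep (true, name, tones, tok) c = (true, name, tones, tok ++ [c]) := by
          simp [pvScanStep, hc, hsp.1, hsp.2]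
        have hp : pvToneP c = true := by simp [pvToneP, hsp.1, hsp.2]
        rw [hstep, ih, List.filter_cons_of_pos hp, pvSplit1_cons_ne _ c _ hc]
        rcases h0 : pvSplit1 ',' (t.filter pvToneP) with _ | ⟨hd, r⟩
        · exact absurd h0 (pvSplit1_ne_nil _ _)
        · simp

def pvNameA (ch : List Char) : List Char := ((pvSplit1 '[' ch).getD 0 []).filter pvNameP

def pvTonesA (ch : List Char) : List Int :=
  ((pvSplit1 ',' (((pvSplit1 '[' ch).getD 1 []).filter pvToneP)).filter (fun t => decide (t ≠ []))).map pvF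

theorem pvScanChunk_eq (ch : List Char) (h : ch.count '[' = 1) :
    pvScanChunk ch = (pvNameA ch, pvTonesA ch) := by
  obtain ⟨xs, ys, rfl, hx, hy⟩ := pvCount_one '[' ch h
  have hch : pvScanChunk (xs ++ '[' :: ys) = pvFlush ((xs ++ '[' :: ys).foldl pvScanStep (false, [], [], [])) := rfl
  rw [hch, List.foldl_append, pvNameScan xs [] [] [] hx, List.foldl_cons]
  have hstep : pvScanStep (false, [] ++ xs.filter pvNameP, [], []) '[' = (true, xs.filter pvNameP, [], []) := by
    simp [pvScanStep]
  rw [hstep, pvToneScan]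
  have hsp : pvSplit1 '[' (xs ++ '[' :: ys) = xs :: pvSplit1 '[' ys := pvSplit1_pair '[' xs ys hx
  rw [pvNameA, pvTonesA, hsp, pvSplit1_of_not_mem '[' ys hy]
  rcases h0 : pvSplit1 ',' (ys.filter pvToneP) with _ | ⟨hd, r⟩
  · exact absurd h0 (pvSplit1_ne_nil _ _)
  · simp [h0]

theorem pvStepA_eq (st : List Char × List (List Int)) (ch : List Char) :
    pvStepA st ch = (st.1 ++ ',' :: pvNameA ch, st.2 ++ [pvTonesA ch]) := by
  rw [pvStepA]
  simp only [pvSplitOn_single, pvReplace_single, List.filter_filter]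
  rw [pvNameA, pvTonesA]
  rfl

theorem pvFoldA (chunks : List (List Char)) : ∀ (s0 : List Char) (t0 : List (List Int)),
    chunks.foldl pvStepA (s0, t0) = (s0 ++ (chunks.map (fun ch => ',' :: pvNameA ch)).flatten, t0 ++ chunks.map pvTonesA) := by
  induction chunks with
  | nil => intro s0 t0; simp
  | cons c t ih =>
    intro s0 t0
    rw [List.foldl_cons, pvStepA_eq, ih]
    simp

theorem pvFoldB (chunks : List (List Char)) : ∀ (n0 : List (List Char)) (t0 : List (List Int)),
    chunks.foldl pvStepB (n0, t0) = (n0 ++ chunks.map (fun ch => (pvScanChunk ch).1), t0 ++ chunks.map (fun ch => (pvScanChunk ch).2)) := by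
  induction chunks with
  | nil => intro n0 t0; simp
  | cons c t ih =>
    intro n0 t0
    rw [List.foldl_cons]
    show (c :: t).tail.foldl pvStepB (pvStepB (n0, t0) c) = _
    rw [List.tail_cons] at *
    rw [ih]
    simp [pvStepB]

theorem pvJoinFlatten : ∀ (l : List (List Char)),
    ((l.map (fun x => ',' :: x)).flatten).drop 1 = PySem.Chars.join [','] l := by
  intro l
  induction l with
  | nil => simp [PySem.Chars.join_nil]
  | cons x t ih =>
    cases t with
    | nil => simp [PySem.Chars.join_singleton]
    | cons y ys =>
      rw [PySem.Chars.join_cons_cons]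
      simp only [List.map_cons, List.flatten_cons] at *
      rw [List.cons_append, List.drop_one, List.tail_cons]
      have hhead : (',' :: y ++ ((ys.map (fun x => ',' :: x)).flatten)) =
          ',' :: (y ++ ((ys.map (fun x => ',' :: x)).flatten)) := rfl
      rw [List.drop_one, hhead, List.tail_cons] at ih
      rw [← ih]
      simp

theorem pvCleanEq (t : List Char) :
    PySem.Chars.replace (PySem.Chars.replace t ['('] []) [')'] [] = t.filter (fun c => !(['(', ')'].contains c)) := by
  rw [pvReplace_single, pvReplace_single, List.filter_filter]
  congr 1
  funext c
  simp [Bool.and_comm]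

-- ===== VERDICT (by name: the statement is the Claim_ definition above) =====
theorem translate_sonic_pi_ring_spec : Claim_equal_translate_sonic_pi_ring := by
  intro s _ hpre
  unfold Pre_translate_sonic_pi_ring at hpre
  rw [pvCleanEq] at hpre
  simp only [Spec_translate_sonic_pi_ring, translate_sonic_pi_ring, translate_sonic_pi_ring_alt]
  rw [pvCleanEq]
  rw [pvFoldA, pvFoldB]
  have hcnt : ∀ ch ∈ PySem.List.slice (PySem.Chars.splitOn ((PySem.Chars.replace s.toList ("ring <".toList) []).filter (fun c => !(['(', ')'].contains c))) ("SonicPi::Chord ".toList)) (some 1) none, ch.count '[' = 1 := by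
    intro ch hm
    rw [PySem.List.slice_from_one, ← List.drop_one] at hm
    exact (hpre ch hm).1
  have hmap1 : (PySem.List.slice (PySem.Chars.splitOn ((PySem.Chars.replace s.toList ("ring <".toList) []).filter (fun c => !(['(', ')'].contains c))) ("SonicPi::Chord ".toList)) (some 1) none).map (fun ch => (pvScanChunk ch).1)
      = (PySem.List.slice (PySem.Chars.splitOn ((PySem.Chars.replace s.toList ("ring <".toList) []).filter (fun c => !(['(', ')'].contains c))) ("SonicPi::Chord ".toList)) (some 1) none).map pvNameA := by
    apply List.map_congr_left
    intro ch hm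
    rw [pvScanChunk_eq ch (hcnt ch hm)]
  have hmap2 : (PySem.List.slice (PySem.Chars.splitOn ((PySem.Chars.replace s.toList ("ring <".toList) []).filter (fun c => !(['(', ')'].contains c))) ("SonicPi::Chord ".toList)) (some 1) none).map (fun ch => (pvScanChunk ch).2)
      = (PySem.List.slice (PySem.Chars.splitOn ((PySem.Chars.replace s.toList ("ring <".toList) []).filter (fun c => !(['(', ')'].contains c))) ("SonicPi::Chord ".toList)) (some 1) none).map pvTonesA := by
    apply List.map_congr_left
    intro ch hm
    rw [pvScanChunk_eq ch (hcnt ch hm)]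
  rw [hmap1, hmap2]
  simp only [List.nil_append]
  refine Prod.ext ?_ rfl
  show String.ofList (PySem.List.slice _ (some 1) none) = String.ofList (PySem.Chars.join [','] _)
  rw [PySem.List.slice_from_one, ← List.drop_one]
  rw [← pvJoinFlatten, List.map_map]
  rfl
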